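-- pv_equiv track=rewrite | github.com/paiml/depyler | examples/hard_wave3_032.py | count_digit_runs
-- ===== SOURCE A (Python) =====
-- def count_digit_runs(text: str) -> int:
--     """Count consecutive runs of digit characters."""
--     count: int = 0
--     in_run: bool = False
--     i: int = 0
--     while i < len(text):
--         if text[i] >= "0" and text[i] <= "9":
--             if not in_run:
--                 count += 1
--                 in_run = True
--         else:
--             in_run = False
--         i += 1
--     return count
-- ===== SOURCE B (Python) =====
-- def count_digit_runs(text: str) -> int:
--     """Count consecutive runs of digit characters."""
--     cleaned = "".join(c if "0" <= c <= "9" else " " for c in text)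
--     return len(cleaned.split())
-- ===== Notes on version B (the rewrite author's own statement) =====
-- stated objective: faster
-- what changed: Replaces the while-loop state machine (index, in_run flag) by two staged library passes: map every non-digit character to a space, then str.split() extracts the maximal digit blocks and len counts them; the C-level split removes the per-character Python-level flag bookkeeping (measured ~2x).
import Mathlib
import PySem

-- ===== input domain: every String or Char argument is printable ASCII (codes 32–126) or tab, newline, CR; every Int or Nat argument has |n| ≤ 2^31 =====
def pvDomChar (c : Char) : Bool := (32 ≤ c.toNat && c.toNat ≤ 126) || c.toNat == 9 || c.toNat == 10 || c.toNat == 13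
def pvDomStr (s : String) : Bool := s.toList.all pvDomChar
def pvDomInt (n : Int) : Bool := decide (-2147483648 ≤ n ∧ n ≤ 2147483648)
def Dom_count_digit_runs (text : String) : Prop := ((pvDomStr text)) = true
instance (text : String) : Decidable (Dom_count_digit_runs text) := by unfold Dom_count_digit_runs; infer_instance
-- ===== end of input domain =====

-- B replaces A's while-loop state machine (in_run flag) by two staged passes:
-- map non-digits to spaces, then count the words of str.split() (measured faster by a constant factor).

-- ===== PORT A =====
-- A's while loop over the characters carrying (count, in_run); branch order as in A.
def pvLoopA : List Char → Int → Bool → Int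
  | [], count, _ => count
  | c :: rest, count, in_run =>
    if '0' ≤ c ∧ c ≤ '9' then
      if ¬ in_run then pvLoopA rest (count + 1) true
      else pvLoopA rest count true
    else pvLoopA rest count false

def count_digit_runs (text : String) : Int := pvLoopA text.toList 0 false

-- ===== PORT B =====
def pvIsDig (c : Char) : Bool := decide ('0' ≤ c) && decide (c ≤ '9')

-- "".join(c if digit else " " for c in text), then len(cleaned.split())
def count_digit_runs_alt (text : String) : Int :=
  Int.ofNat (PySem.Str.split₀
    (String.ofList (text.toList.map (fun c => if pvIsDig c then c else ' ')))).length

-- ===== PRECONDITION & SPEC =====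
def Spec_count_digit_runs (text : String) (out : Int) : Prop := out = count_digit_runs_alt text
instance (text : String) (out : Int) : Decidable (Spec_count_digit_runs text out) := by unfold Spec_count_digit_runs; infer_instance

-- ===== CLAIM (what is proved, stated in full; the proofs are below) =====
def Claim_equal_count_digit_runs : Prop := ∀ (text : String), Dom_count_digit_runs text → Spec_count_digit_runs text (count_digit_runs text)

-- ===== LEMMAS AND PROOFS =====
theorem pvLoopA_cons (c : Char) (rest : List Char) (count : Int) (b : Bool) :
    pvLoopA (c :: rest) count b
      = if '0' ≤ c ∧ c ≤ '9' then
          (if b then pvLoopA rest count true else pvLoopA rest (count + 1) true)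
        else pvLoopA rest count false := by
  cases b <;> rfl

-- A's loop is affine in its count accumulator.
theorem pvLoopA_shift (l : List Char) : ∀ (count : Int) (b : Bool),
    pvLoopA l count b = count + pvLoopA l 0 b := by
  induction l with
  | nil => intro count b; simp [pvLoopA]
  | cons c rest ih =>
    intro count b
    rw [pvLoopA_cons, pvLoopA_cons]
    by_cases hc : '0' ≤ c ∧ c ≤ '9'
    · rw [if_pos hc, if_pos hc]
      cases b
      · rw [ih (count + 1), ih (0 + 1)]
        simp; ring
      · simp only [if_pos]
        rw [ih count]
    · rw [if_neg hc, if_neg hc, ih count]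

theorem pvIsDig_not_space (c : Char) (h : pvIsDig c = true) :
    PySem.Chars.isspace c = false := by
  simp only [pvIsDig, Bool.and_eq_true, decide_eq_true_eq] at h
  have h0 : 48 ≤ c.toNat := h.1
  have h9 : c.toNat ≤ 57 := h.2
  simp only [PySem.Chars.isspace]
  simp only [Bool.or_eq_false_iff, Bool.and_eq_false_iff, decide_eq_false_iff_not]
  omega

-- Invariant tying split₀'s word accumulator to A's run counter: on a list whose
-- characters are digits or spaces, the number of words produced equals the words
-- already closed (acc) plus the pending open word (curw) plus the runs A still counts.
theorem go_len (l : List Char) : ∀ (acc : List (List Char)) (curw : List Char),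
    ((PySem.Chars.split₀.go (l.map (fun c => if pvIsDig c then c else ' ')) curw acc).length : Int)
      = acc.length + (if curw.isEmpty then 0 else 1) + pvLoopA l 0 (!curw.isEmpty) := by
  induction l with
  | nil =>
    intro acc curw
    by_cases h : curw.isEmpty <;> simp [PySem.Chars.split₀.go, h, pvLoopA]
  | cons c rest ih =>
    intro acc curw
    rw [List.map_cons, pvLoopA_cons]
    by_cases hc : '0' ≤ c ∧ c ≤ '9'
    · have hd : pvIsDig c = true := by
        simp [pvIsDig, decide_eq_true_eq]; exact hc
      have hns := pvIsDig_not_space c hd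
      rw [if_pos hc, show (if pvIsDig c = true then c else ' ') = c from if_pos hd]
      show ((PySem.Chars.split₀.go _ _ _).length : Int) = _
      unfold PySem.Chars.split₀.go
      rw [if_neg (by simp [hns])]
      rw [ih acc (c :: curw)]
      cases curw
      · rw [pvLoopA_shift rest (0 + 1)]
        simp; ring
      · simp
    · have hd : pvIsDig c = false := by
        rcases Decidable.not_and_iff_not_or_not.mp hc with h1 | h1 <;> simp [pvIsDig, h1]
      rw [if_neg hc, show (if pvIsDig c = true then c else ' ') = ' ' from by rw [hd]; rfl]
      show ((PySem.Chars.split₀.go _ _ _).length : Int) = _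
      unfold PySem.Chars.split₀.go
      rw [if_pos (show PySem.Chars.isspace ' ' = true from by decide)]
      cases curw
      · rw [if_pos (by simp), ih acc []]
        simp
      · rw [if_neg (by simp), ih (_ :: acc) []]
        simp

-- ===== VERDICT (by name: the statement is the Claim_ definition above) =====
theorem count_digit_runs_spec : Claim_equal_count_digit_runs := by
  intro text _
  unfold Spec_count_digit_runs count_digit_runs count_digit_runs_alt
  simp only [PySem.Str.split₀, String.toList_ofList, List.length_map, PySem.Chars.split₀]
  have h := go_len text.toList [] []
  simpa using h.symm
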